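-- pv_equiv track=rewrite | github.com/justinaskav/q2-jk | q2_jk/_bias_detection.py | _generate_bias_recommendations
-- ===== SOURCE A (Python) =====
-- from typing import Optional, Dict, List, Any, Tuple
--
-- def _generate_bias_recommendations(extraction_flags: List[str]) -> List[str]:
--     """Generate specific recommendations based on extraction quality flags."""
--     recommendations = []
--
--     if any("Critical" in flag for flag in extraction_flags):
--         recommendations.extend([
--             "CRITICAL: Re-extract samples using enhanced Gram-positive lysis protocol",
--             "Use lysozyme treatment (>30 min) + mechanical disruption (bead-beating)",
--             "Validate with qPCR targeting Firmicutes and Actinomycetota"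
--         ])
--     elif any("Severe" in flag for flag in extraction_flags):
--         recommendations.extend([
--             "Re-extract subset of samples with optimized protocol",
--             "Include mock communities with known Gram-positive bacteria",
--             "Compare results with original extraction protocol"
--         ])
--     elif any("High" in flag or "Moderate" in flag for flag in extraction_flags):
--         recommendations.extend([
--             "Validate key findings with qPCR",
--             "Check extraction protocol for Gram-positive optimization",
--             "Consider biological vs technical variation"
--         ])
--
--     if extraction_flags:
--         recommendations.append("Document extraction protocol details for publication")
--
--     return recommendations
-- ===== SOURCE B (Python) =====
-- from typing import List
--
-- _BLOCKS = {
--     3: [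
--         "CRITICAL: Re-extract samples using enhanced Gram-positive lysis protocol",
--         "Use lysozyme treatment (>30 min) + mechanical disruption (bead-beating)",
--         "Validate with qPCR targeting Firmicutes and Actinomycetota",
--     ],
--     2: [
--         "Re-extract subset of samples with optimized protocol",
--         "Include mock communities with known Gram-positive bacteria",
--         "Compare results with original extraction protocol",
--     ],
--     1: [
--         "Validate key findings with qPCR",
--         "Check extraction protocol for Gram-positive optimization",
--         "Consider biological vs technical variation",
--     ],
--     0: [],
-- }
--
--
-- def _severity(flag: str) -> int:
--     """Numeric severity of a single flag (higher = worse)."""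
--     if "Critical" in flag:
--         return 3
--     if "Severe" in flag:
--         return 2
--     if "High" in flag or "Moderate" in flag:
--         return 1
--     return 0
--
--
-- def _generate_bias_recommendations(extraction_flags: List[str]) -> List[str]:
--     level = max(map(_severity, extraction_flags), default=0)
--     recommendations = list(_BLOCKS[level])
--     if extraction_flags:
--         recommendations.append("Document extraction protocol details for publication")
--     return recommendations
-- ===== Notes on version B (the rewrite author's own statement) =====
-- stated objective: alternative
-- what changed: B scores each flag with a numeric severity in one pass, takes the maximum level, and indexes a block table by that level, replacing A's three staged any() substring scans and if/elif chain.
import Mathlib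
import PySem

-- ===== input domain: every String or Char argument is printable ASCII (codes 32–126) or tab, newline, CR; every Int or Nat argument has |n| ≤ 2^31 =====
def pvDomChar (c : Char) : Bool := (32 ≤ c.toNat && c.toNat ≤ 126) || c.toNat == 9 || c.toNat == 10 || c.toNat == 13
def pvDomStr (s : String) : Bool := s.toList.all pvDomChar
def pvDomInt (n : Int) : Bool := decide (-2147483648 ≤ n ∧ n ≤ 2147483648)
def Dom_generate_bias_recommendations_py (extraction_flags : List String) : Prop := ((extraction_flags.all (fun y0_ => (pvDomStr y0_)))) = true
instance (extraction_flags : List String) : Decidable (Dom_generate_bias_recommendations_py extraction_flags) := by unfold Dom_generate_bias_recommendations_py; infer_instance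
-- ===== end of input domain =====

-- B replaces A's staged any()/elif substring scans by a one-pass numeric max-severity score
-- indexed into a block table (alternative decomposition, same cost).

-- ===== PORT A =====
-- literal transliteration of A's if/elif/elif chain plus the trailing append
def generate_bias_recommendations_py (extraction_flags : List String) : List String :=
  let recommendations : List String := []
  let recommendations :=
    if extraction_flags.any (fun flag => PySem.Str.isIn "Critical" flag) then
      recommendations ++
        ["CRITICAL: Re-extract samples using enhanced Gram-positive lysis protocol",
         "Use lysozyme treatment (>30 min) + mechanical disruption (bead-beating)",
         "Validate with qPCR targeting Firmicutes and Actinomycetota"]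
    else if extraction_flags.any (fun flag => PySem.Str.isIn "Severe" flag) then
      recommendations ++
        ["Re-extract subset of samples with optimized protocol",
         "Include mock communities with known Gram-positive bacteria",
         "Compare results with original extraction protocol"]
    else if extraction_flags.any (fun flag => PySem.Str.isIn "High" flag || PySem.Str.isIn "Moderate" flag) then
      recommendations ++
        ["Validate key findings with qPCR",
         "Check extraction protocol for Gram-positive optimization",
         "Consider biological vs technical variation"]
    else recommendations
  if !extraction_flags.isEmpty then
    recommendations ++ ["Document extraction protocol details for publication"]
  else recommendations

-- ===== PORT B =====
-- numeric severity of a single flag (B's _severity)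
def pvSeverity (flag : String) : Nat :=
  if PySem.Str.isIn "Critical" flag then 3
  else if PySem.Str.isIn "Severe" flag then 2
  else if PySem.Str.isIn "High" flag || PySem.Str.isIn "Moderate" flag then 1
  else 0

-- B's _BLOCKS table lookup by level
def pvBlock (level : Nat) : List String :=
  match level with
  | 3 => ["CRITICAL: Re-extract samples using enhanced Gram-positive lysis protocol",
          "Use lysozyme treatment (>30 min) + mechanical disruption (bead-beating)",
          "Validate with qPCR targeting Firmicutes and Actinomycetota"]
  | 2 => ["Re-extract subset of samples with optimized protocol",
          "Include mock communities with known Gram-positive bacteria",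
          "Compare results with original extraction protocol"]
  | 1 => ["Validate key findings with qPCR",
          "Check extraction protocol for Gram-positive optimization",
          "Consider biological vs technical variation"]
  | _ => []

def generate_bias_recommendations_py_alt (extraction_flags : List String) : List String :=
  -- max(map(_severity, extraction_flags), default=0)
  let level := extraction_flags.foldl (fun m f => max m (pvSeverity f)) 0
  let recommendations := pvBlock level
  if !extraction_flags.isEmpty then
    recommendations ++ ["Document extraction protocol details for publication"]
  else recommendations

-- ===== PRECONDITION & SPEC =====
def Spec_generate_bias_recommendations_py (extraction_flags : List String) (out : List String) : Prop := out = generate_bias_recommendations_py_alt extraction_flags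
instance (extraction_flags : List String) (out : List String) : Decidable (Spec_generate_bias_recommendations_py extraction_flags out) := by unfold Spec_generate_bias_recommendations_py; infer_instance

-- ===== CLAIM =====
def Claim_equal_generate_bias_recommendations_py : Prop := ∀ (extraction_flags : List String), Dom_generate_bias_recommendations_py extraction_flags → Spec_generate_bias_recommendations_py extraction_flags (generate_bias_recommendations_py extraction_flags)

-- ===== LEMMAS AND PROOFS =====
-- structural maximum of severities, generic in the per-flag score
def pvMaxSevG (sev : String -> Nat) (flags : List String) : Nat :=
  match flags with
  | [] => 0
  | f :: t => max (sev f) (pvMaxSevG sev t)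

theorem pv_foldl_maxsev (sev : String -> Nat) (flags : List String) (a : Nat) :
    flags.foldl (fun m f => max m (sev f)) a = max a (pvMaxSevG sev flags) := by
  induction flags generalizing a with
  | nil => simp [pvMaxSevG]
  | cons f t ih => simp [List.foldl_cons, pvMaxSevG, ih, Nat.max_assoc]

-- the max severity level equals the first branch of A's chain that fires (abstract form)
theorem pv_maxsev_chain (p q r : String -> Bool) (flags : List String) :
    pvMaxSevG (fun f => if p f then 3 else if q f then 2 else if r f then 1 else 0) flags =
      (if flags.any p then 3
       else if flags.any q then 2
       else if flags.any r then 1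
       else 0) := by
  induction flags with
  | nil => simp [pvMaxSevG]
  | cons f t ih =>
    simp only [pvMaxSevG, List.any_cons, ih, Bool.or_eq_true]
    split_ifs <;> first | omega | tauto

theorem pv_maxsev_sev (flags : List String) :
    pvMaxSevG pvSeverity flags =
      (if flags.any (fun flag => PySem.Str.isIn "Critical" flag) then 3
       else if flags.any (fun flag => PySem.Str.isIn "Severe" flag) then 2
       else if flags.any (fun flag => PySem.Str.isIn "High" flag || PySem.Str.isIn "Moderate" flag) then 1
       else 0) :=
  pv_maxsev_chain (fun f => PySem.Str.isIn "Critical" f) (fun f => PySem.Str.isIn "Severe" f)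
    (fun f => PySem.Str.isIn "High" f || PySem.Str.isIn "Moderate" f) flags

-- ===== VERDICT =====
theorem generate_bias_recommendations_py_spec : Claim_equal_generate_bias_recommendations_py := by
  intro flags _
  unfold Spec_generate_bias_recommendations_py generate_bias_recommendations_py
    generate_bias_recommendations_py_alt
  rw [pv_foldl_maxsev pvSeverity flags 0, Nat.zero_max, pv_maxsev_sev]
  split_ifs <;> rfl
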